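-- pv_equiv track=rewrite | github.com/almonds0166/Kotobot2 | util.py | shorten_title
-- ===== SOURCE A (Python) =====
-- def shorten_title(title: str, max_length: int=32) -> str:
--    """Shortens the given string on a word-by-word basis.
--
--    Args:
--       title: Title to be shortened if necessary.
--       max_length: Max number of characters that the title should have.
--    """
--    assert max_length >= 3, f"Dude, the max_length you gave me ({max_length}) is way too short."
--    # title length is OK
--    if len(title) <= max_length:
--       return title
--
--    # if the first word is too long
--    split_title = title.split(" ")
--    if len(split_title[0]) > max_length:
--       return split_title[0][:max_length-3] + "..."
--
--    # otherwise, go by words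
--    short_title = split_title[0]
--    for word in split_title[1:]:
--       if len(short_title) + len(word) + 1 > max_length-3:
--          return short_title + "..."
--       short_title += " " + word
-- ===== SOURCE B (Python) =====
-- def shorten_title(title: str, max_length: int=32) -> str:
--    """Shortens the given string on a word-by-word basis."""
--    assert max_length >= 3, f"Dude, the max_length you gave me ({max_length}) is way too short."
--    if len(title) <= max_length:
--       return title
--    limit = max_length - 3
--    first_space = title.find(" ")
--    first_len = len(title) if first_space == -1 else first_space
--    # first word alone does not fit the max length
--    if first_len > max_length:
--       return title[:limit] + "..."
--    # cut at the rightmost space whose prefix fits the limit; the first word is always kept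
--    cut = title.rfind(" ", 0, limit + 1)
--    if cut == -1:
--       return title[:first_space] + "..."
--    return title[:cut] + "..."
-- ===== Notes on version B (the rewrite author's own statement) =====
-- stated objective: idiomatic
-- what changed: Replaces A's split-the-string-and-greedily-reaccumulate-words loop by a direct cut-point search on the string itself: one find for the first word's length and one bounded rfind for the rightmost space whose prefix fits max_length-3, then a single slice.
import Mathlib
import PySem

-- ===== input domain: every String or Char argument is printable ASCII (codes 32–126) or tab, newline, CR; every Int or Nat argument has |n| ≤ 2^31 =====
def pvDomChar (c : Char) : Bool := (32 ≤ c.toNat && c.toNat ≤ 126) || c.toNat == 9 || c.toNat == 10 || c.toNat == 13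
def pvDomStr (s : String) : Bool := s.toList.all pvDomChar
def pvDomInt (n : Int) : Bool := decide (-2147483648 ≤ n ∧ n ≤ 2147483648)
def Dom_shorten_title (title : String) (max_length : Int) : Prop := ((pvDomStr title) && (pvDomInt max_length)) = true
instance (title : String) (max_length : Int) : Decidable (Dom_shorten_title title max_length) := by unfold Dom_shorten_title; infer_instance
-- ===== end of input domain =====

-- B rewrites the word-by-word accumulation loop as a direct rfind cut-point search on the string (idiomatic; same cost).

-- ===== PORT A =====
-- the for-loop over split_title[1:], with its early 'return short_title + "..."' as 'some';
-- falling off the end is Python's implicit 'return None', modelled as 'none'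
def shortenLoop (max_length : Int) : List Char → List (List Char) → Option (List Char)
  | _, [] => none
  | short_title, word :: rest =>
      if PySem.List.len short_title + PySem.List.len word + 1 > max_length - 3 then
        some (short_title ++ "...".toList)
      else shortenLoop max_length (short_title ++ ' ' :: word) rest

def shorten_title (title : String) (max_length : Int) : String :=
  -- assert max_length >= 3 raises for max_length < 3: excluded by Pre_
  if PySem.Str.len title ≤ max_length then title
  else
    -- title.split(" "): a nonempty separator, so PySem.Str.split? = some (Chars.splitOn ·)
    let split_title := PySem.Chars.splitOn title.toList [' ']
    let first := split_title.headD []    -- split_title[0]; split(" ") never returns an empty list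
    if PySem.List.len first > max_length then
      String.ofList (PySem.List.slice first none (some (max_length - 3)) ++ "...".toList)
    else
      match shortenLoop max_length first split_title.tail with
      | some r => String.ofList r
      | none => ""   -- Python's implicit 'return None'; the equivalence proof shows this case is never reached under Pre_

-- ===== PORT B =====
def shorten_title_alt (title : String) (max_length : Int) : String :=
  if PySem.Str.len title ≤ max_length then title
  else
    let limit := max_length - 3
    let first_space := PySem.Chars.find title.toList [' ']
    let first_len := if first_space = -1 then PySem.Str.len title else first_space
    if first_len > max_length then
      String.ofList (PySem.Chars.slice title.toList none (some limit) ++ "...".toList)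
    else
      let cut := PySem.Chars.rfindFrom title.toList [' '] 0 (some (limit + 1))
      if cut = -1 then
        String.ofList (PySem.Chars.slice title.toList none (some first_space) ++ "...".toList)
      else
        String.ofList (PySem.Chars.slice title.toList none (some cut) ++ "...".toList)

-- ===== PRECONDITION & SPEC =====
-- Pre_ excludes max_length < 3, where A's assert raises AssertionError.
def Pre_shorten_title (title : String) (max_length : Int) : Prop := 3 ≤ max_length
instance (title : String) (max_length : Int) : Decidable (Pre_shorten_title title max_length) := by unfold Pre_shorten_title; infer_instance
def pvWitness_shorten_title : String × Int := ("a word by word shortened title", 12)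

def Spec_shorten_title (title : String) (max_length : Int) (out : String) : Prop := out = shorten_title_alt title max_length
instance (title : String) (max_length : Int) (out : String) : Decidable (Spec_shorten_title title max_length out) := by unfold Spec_shorten_title; infer_instance

-- ===== CLAIM (what is proved, stated in full; the proofs are below) =====
def Claim_equal_shorten_title : Prop := ∀ (title : String) (max_length : Int), Dom_shorten_title title max_length → Pre_shorten_title title max_length → Spec_shorten_title title max_length (shorten_title title max_length)

-- ===== LEMMAS AND PROOFS =====

-- first word and remaining words when splitting on a single space

def mySplit : List Char → List Char × List (List Char)
  | [] => ([], [])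
  | c :: r => if c = ' ' then ([], (mySplit r).1 :: (mySplit r).2) else (c :: (mySplit r).1, (mySplit r).2)
def joinTail (ws : List (List Char)) : List Char := (ws.map (fun w => ' ' :: w)).flatten

theorem joinTail_cons (w : List Char) (ws : List (List Char)) :
    joinTail (w :: ws) = ' ' :: (w ++ joinTail ws) := by simp [joinTail]

theorem splitOn_go_eq (fuel : Nat) (l cur : List Char) (acc : List (List Char)) (h : l.length ≤ fuel) :
    PySem.Chars.splitOn.go [' '] fuel l cur acc =
      acc.reverse ++ (cur.reverse ++ (mySplit l).1) :: (mySplit l).2 := by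
  induction fuel generalizing l cur acc with
  | zero =>
    have : l = [] := by cases l <;> simp_all
    subst this
    simp [PySem.Chars.splitOn.go, mySplit]
  | succ n ih =>
    cases l with
    | nil => simp [PySem.Chars.splitOn.go, mySplit]
    | cons c rest =>
      by_cases hc : c = ' '
      · subst hc
        rw [PySem.Chars.splitOn.go]
        simp only [List.isPrefixOf, BEq.rfl, Bool.true_and, if_pos]
        rw [ih _ _ _ (by simpa using Nat.le_of_succ_le_succ (by simpa using h))]
        simp [mySplit]
      · rw [PySem.Chars.splitOn.go]
        simp only [List.isPrefixOf]
        rw [if_neg (by simp only [beq_eq_false_iff_ne, Bool.and_eq_true, beq_iff_eq, ne_eq]; exact fun h' => hc h'.1.symm)]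
        rw [ih _ _ _ (by simpa using Nat.le_of_succ_le_succ (by simpa using h))]
        simp [mySplit, hc]

theorem splitOn_eq (s : List Char) :
    PySem.Chars.splitOn s [' '] = (mySplit s).1 :: (mySplit s).2 := by
  rw [PySem.Chars.splitOn, splitOn_go_eq _ _ _ _ (by omega)]
  simp

theorem mySplit_join (s : List Char) : (mySplit s).1 ++ joinTail (mySplit s).2 = s := by
  induction s with
  | nil => simp [mySplit, joinTail]
  | cons c r ih =>
    by_cases hc : c = ' '
    · subst hc; simp [mySplit, joinTail] at *; exact ih
    · simp [mySplit, hc] at *; exact ih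

theorem mySplit_fst_noSpace (s : List Char) : ' ' ∉ (mySplit s).1 := by
  induction s with
  | nil => simp [mySplit]
  | cons c r ih =>
    by_cases hc : c = ' ' <;> simp [mySplit, hc] <;> simp_all [eq_comm]

theorem mySplit_snd_noSpace (s : List Char) : ∀ w ∈ (mySplit s).2, ' ' ∉ w := by
  induction s with
  | nil => simp [mySplit]
  | cons c r ih =>
    by_cases hc : c = ' ' <;> simp [mySplit, hc]
    · exact ⟨mySplit_fst_noSpace r, ih⟩
    · exact ih

theorem singleton_isPrefixOf_iff (a : Char) (l : List Char) : [a].isPrefixOf l = true ↔ l.head? = some a := by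
  rw [List.isPrefixOf_iff_prefix]
  cases l with
  | nil => simp
  | cons b t => simp [List.cons_prefix_cons, eq_comm]

theorem find_space_of_append (pre t : List Char) (h : ' ' ∉ pre) :
    PySem.Chars.find (pre ++ ' ' :: t) [' '] = (pre.length : Int) := by
  set s := pre ++ ' ' :: t with hs
  have hne : PySem.Chars.find s [' '] ≠ -1 := by
    rw [ne_eq, PySem.Chars.find_eq_neg_one_iff, List.singleton_infix_iff]; simp [hs]
  have hspec := PySem.Chars.findFrom_natCast_spec s [' '] 0 (by omega) (by simpa using hne)
  simp only [Nat.cast_zero, PySem.Chars.findFrom_zero] at hspec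
  obtain ⟨h0, hpref, hmin⟩ := hspec
  set r := PySem.Chars.find s [' '] with hr
  have hple : r.toNat ≤ pre.length := by
    by_contra hgt
    refine hmin pre.length (by omega) (by omega) ?_
    rw [hs, List.drop_append_of_le_length (by omega), List.drop_length]
    exact ⟨t, rfl⟩
  have hsp : s[r.toNat]? = some ' ' := by
    rw [← List.head?_drop]
    rcases hpref with ⟨u, hu⟩
    rw [← hu]; rfl
  have : r.toNat = pre.length := by
    rcases Nat.lt_or_ge r.toNat pre.length with hlt | hge
    · exfalso
      rw [List.getElem?_append_left hlt] at hsp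
      exact h (List.mem_of_getElem? hsp)
    · omega
  omega

theorem space_isPrefixOf_drop (s : List Char) (i : Nat) :
    [' '].isPrefixOf (s.drop i) = true ↔ s[i]? = some ' ' := by
  rw [singleton_isPrefixOf_iff, List.head?_drop]

theorem rfind_go_neg (s : List Char) (j : Nat) (h : ∀ i ≤ j, s[i]? ≠ some ' ') :
    PySem.Chars.rfind.go s [' '] j = -1 := by
  induction j with
  | zero =>
    rw [PySem.Chars.rfind.go]
    rw [if_neg]
    intro hc
    exact h 0 (by omega) ((space_isPrefixOf_drop s 0).mp (by simpa using hc))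
  | succ n ih =>
    rw [PySem.Chars.rfind.go]
    rw [if_neg (fun hc => h (n+1) (by omega) ((space_isPrefixOf_drop s (n+1)).mp hc))]
    exact ih (fun i hi => h i (by omega))

theorem rfind_go_pos (s : List Char) (j p : Nat) (hpj : p ≤ j) (hp : s[p]? = some ' ')
    (h : ∀ q, p < q → q ≤ j → s[q]? ≠ some ' ') :
    PySem.Chars.rfind.go s [' '] j = (p : Int) := by
  induction j with
  | zero =>
    have : p = 0 := by omega
    subst this
    rw [PySem.Chars.rfind.go, if_pos]
    · rfl
    · exact (space_isPrefixOf_drop s 0).mpr (by simpa using hp)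
  | succ n ih =>
    rw [PySem.Chars.rfind.go]
    by_cases hc : p = n + 1
    · subst hc
      rw [if_pos ((space_isPrefixOf_drop s (n+1)).mpr hp)]
    · rw [if_neg (fun hpf => h (n+1) (by omega) (by omega) ((space_isPrefixOf_drop s (n+1)).mp hpf))]
      exact ih (by omega) (fun q hq1 hq2 => h q hq1 (by omega))

theorem rfind_space_neg (cs : List Char) (h : ' ' ∉ cs) : PySem.Chars.rfind cs [' '] = -1 := by
  rw [PySem.Chars.rfind]
  exact rfind_go_neg cs cs.length (fun i _ hc => h (List.mem_of_getElem? hc))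

theorem rfind_space_pos (cs : List Char) (p : Nat) (hp : cs[p]? = some ' ')
    (h : ∀ q, p < q → cs[q]? ≠ some ' ') : PySem.Chars.rfind cs [' '] = (p : Int) := by
  rw [PySem.Chars.rfind]
  have hlt : p < cs.length := (List.getElem?_eq_some_iff.mp hp).1
  exact rfind_go_pos cs cs.length p (by omega) hp (fun q hq _ => h q hq)

theorem rfindFrom_eq_rfind_take (s : List Char) (e : Int) (h0 : 0 < e) (hn : e < (s.length : Int)) :
    PySem.Chars.rfindFrom s [' '] 0 (some e) = PySem.Chars.rfind (s.take e.toNat) [' '] := by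
  rw [PySem.Chars.rfindFrom]
  split_ifs with h1 h2 h3 <;> first | omega | (simp only [Int.toNat_zero, List.drop_zero]; omega) | skip

theorem getElem?_append_space (pre t : List Char) : (pre ++ ' ' :: t)[pre.length]? = some ' ' := by
  simp [List.getElem?_append_right]

theorem shortenLoop_eq_rfind (M : Int) (rest : List (List Char)) (pre : List Char)
    (hM : 3 ≤ M) (hw : ∀ w ∈ rest, ' ' ∉ w) (hpre : (pre.length : Int) ≤ M - 3)
    (hlong : M - 3 < ((pre ++ joinTail rest).length : Int)) :
    ∃ p : Nat, PySem.Chars.rfind ((pre ++ joinTail rest).take (M - 2).toNat) [' '] = (p : Int) ∧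
      shortenLoop M pre rest = some ((pre ++ joinTail rest).take p ++ "...".toList) := by
  induction rest generalizing pre with
  | nil =>
    exfalso
    simp [joinTail] at hlong
    omega
  | cons w rest' ih =>
    rw [joinTail_cons] at *
    have hs : pre ++ ' ' :: (w ++ joinTail rest') = (pre ++ ' ' :: w) ++ joinTail rest' := by simp
    by_cases hc : (pre.length : Int) + (w.length : Int) + 1 > M - 3
    · refine ⟨pre.length, ?_, ?_⟩
      · apply rfind_space_pos
        · rw [List.getElem?_take_of_lt (by omega)]
          exact getElem?_append_space pre _
        · intro q hq hqe
          by_cases hql : q < (M - 2).toNat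
          · rw [List.getElem?_take_of_lt hql] at hqe
            have hq2 : (q : Int) ≤ M - 3 := by omega
            rw [List.getElem?_append_right (by omega)] at hqe
            have hq3 : q - pre.length = (q - pre.length - 1) + 1 := by omega
            rw [hq3] at hqe
            simp only [List.getElem?_cons_succ] at hqe
            rw [List.getElem?_append_left (by omega)] at hqe
            exact (hw w (by simp)) (List.mem_of_getElem? hqe)
          · rw [List.getElem?_eq_none (by simp; omega)] at hqe
            simp at hqe
      · show shortenLoop M pre (w :: rest') = _
        rw [shortenLoop, if_pos (by simp [PySem.List.len_eq]; omega)]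
        rw [List.take_append_of_le_length (by omega), List.take_length]  -- hope: take pre.length (pre ++ x) = pre
    · have hw' : ∀ v ∈ rest', ' ' ∉ v := fun v hv => hw v (by simp [hv])
      have hpre' : ((pre ++ ' ' :: w).length : Int) ≤ M - 3 := by simp; omega
      have hlong' : M - 3 < (((pre ++ ' ' :: w) ++ joinTail rest').length : Int) := by
        rw [← hs]; exact hlong
      obtain ⟨p, h1, h2⟩ := ih (pre ++ ' ' :: w) hw' hpre' hlong'
      refine ⟨p, ?_, ?_⟩
      · rw [hs]; exact h1
      · show shortenLoop M pre (w :: rest') = _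
        rw [shortenLoop, if_neg (by simp [PySem.List.len_eq]; omega)]
        rw [h2, hs]

theorem find_space_none (s : List Char) (h : ' ' ∉ s) : PySem.Chars.find s [' '] = -1 := by
  simp [PySem.Chars.find_eq_neg_one_iff, List.singleton_infix_iff, h]

theorem shorten_title_eq_alt (title : String) (M : Int) (hM : 3 ≤ M) :
    shorten_title title M = shorten_title_alt title M := by
  unfold shorten_title shorten_title_alt
  simp only [PySem.Str.len_eq, splitOn_eq]
  set s := title.toList with hs
  by_cases h1 : (s.length : Int) ≤ M
  · rw [if_pos h1, if_pos h1]
  · rw [if_neg h1, if_neg h1]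
    simp only [List.headD_cons, List.tail_cons]
    set w0 := (mySplit s).1 with hw0
    set tl := (mySplit s).2 with htl
    have hjoin : w0 ++ joinTail tl = s := mySplit_join s
    have hnos : ' ' ∉ w0 := mySplit_fst_noSpace s
    have hnos2 : ∀ w ∈ tl, ' ' ∉ w := mySplit_snd_noSpace s
    have hflen : (if PySem.Chars.find s [' '] = -1 then (s.length : Int) else PySem.Chars.find s [' ']) = (w0.length : Int) ∧
        (tl = [] ∨ PySem.Chars.find s [' '] = (w0.length : Int)) := by
      cases htl' : tl with
      | nil =>
        have hsw : s = w0 := by rw [← hjoin, htl']; simp [joinTail]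
        rw [if_pos (find_space_none s (by rw [hsw]; exact hnos)), hsw]
        exact ⟨rfl, Or.inl rfl⟩
      | cons v tl' =>
        have hsv : s = w0 ++ ' ' :: (v ++ joinTail tl') := by
          rw [← hjoin, htl', joinTail_cons]
        have hfind : PySem.Chars.find s [' '] = (w0.length : Int) := by
          rw [hsv]; exact find_space_of_append _ _ hnos
        rw [hfind, if_neg (by omega)]
        exact ⟨rfl, Or.inr rfl⟩
    rw [hflen.1]
    simp only [PySem.List.len_eq]
    by_cases h2 : (w0.length : Int) > M
    · rw [if_pos h2, if_pos h2]
      rw [PySem.List.slice_to w0 (b := M - 3) (by omega)]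
      simp only [PySem.Chars.slice_eq_listSlice]
      rw [PySem.List.slice_to s (b := M - 3) (by omega)]
      rw [← hjoin, List.take_append_of_le_length (by omega)]
    · rw [if_neg h2, if_neg h2]
      have htlne : tl ≠ [] := by
        intro h
        rw [h] at hjoin
        simp [joinTail] at hjoin
        rw [← hjoin] at h1
        omega
      cases htl' : tl with
      | nil => exact absurd htl' htlne
      | cons v tl' =>
        have hsv : s = w0 ++ ' ' :: (v ++ joinTail tl') := by
          rw [← hjoin, htl', joinTail_cons]
        have hcut : PySem.Chars.rfindFrom s [' '] 0 (some (M - 3 + 1)) =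
            PySem.Chars.rfind (s.take (M - 2).toNat) [' '] := by
          have h31 : M - 3 + 1 = M - 2 := by ring
          rw [h31]
          exact rfindFrom_eq_rfind_take s (M - 2) (by omega) (by omega)
        have hsj : w0 ++ joinTail (v :: tl') = s := by rw [joinTail_cons]; exact hsv.symm
        by_cases h3 : (w0.length : Int) ≤ M - 3
        · obtain ⟨p, h4, h5⟩ := shortenLoop_eq_rfind M (v :: tl') w0 hM
            (by rw [← htl']; exact hnos2) h3 (by rw [hsj]; omega)
          rw [hsj] at h4 h5
          rw [h5]
          rw [hcut, h4]
          rw [if_neg (by omega)]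
          simp only [PySem.Chars.slice_eq_listSlice]
          rw [PySem.List.slice_to s (b := (p : Int)) (by omega)]
          simp
        · -- M - 3 < w0.length ≤ M : loop stops at the first word, rfind finds no space
          have hcutneg : PySem.Chars.rfind (s.take (M - 2).toNat) [' '] = -1 := by
            apply rfind_space_neg
            intro hmem
            rw [hsv, List.take_append_of_le_length (by omega)] at hmem
            exact hnos (List.mem_of_mem_take hmem)

          rw [shortenLoop, if_pos (by simp only [PySem.List.len_eq]; omega)]
          rw [hcut, hcutneg, if_pos rfl]
          rw [hflen.2.resolve_left (by rw [htl']; simp)]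
          simp only [PySem.Chars.slice_eq_listSlice]
          rw [PySem.List.slice_to s (b := (w0.length : Int)) (by omega)]
          rw [hsv, Int.toNat_natCast, List.take_append_of_le_length (by omega), List.take_length]

-- ===== VERDICT (by name: the statement is the Claim_ definition above) =====
theorem shorten_title_spec : Claim_equal_shorten_title := by
  intro title max_length _ hpre
  show shorten_title title max_length = shorten_title_alt title max_length
  exact shorten_title_eq_alt title max_length hpre
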